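-- pv_equiv track=rewrite | github.com/TheScourge1/AdventOfCodePython | 2024/src/ex22.py | max_diff
-- ===== SOURCE A (Python) =====
-- def max_diff(data: list[dict[str, int]]) -> int:
--     diffs = set([])
--     for d in data:
--         diffs = diffs.union(d.keys())
--     result = 0
--     for diff in diffs:
--         temp = sum([d.get(diff, 0) for d in data])
--         if temp > result:
--             result = temp
--     return result
-- ===== SOURCE B (Python) =====
-- def max_diff(data: list[dict[str, int]]) -> int:
--     totals = {}
--     for d in data:
--         for k in d:
--             totals[k] = totals.get(k, 0) + d[k]
--     best = 0
--     for t in totals.values():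
--         if t > best:
--             best = t
--     return best
-- ===== Notes on version B (the rewrite author's own statement) =====
-- stated objective: faster
-- what changed: B makes one pass over all dict entries accumulating per-key sums in a dict, then takes the max of the sums, instead of A's building the key set and re-scanning every dict for every key.
import Mathlib
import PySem

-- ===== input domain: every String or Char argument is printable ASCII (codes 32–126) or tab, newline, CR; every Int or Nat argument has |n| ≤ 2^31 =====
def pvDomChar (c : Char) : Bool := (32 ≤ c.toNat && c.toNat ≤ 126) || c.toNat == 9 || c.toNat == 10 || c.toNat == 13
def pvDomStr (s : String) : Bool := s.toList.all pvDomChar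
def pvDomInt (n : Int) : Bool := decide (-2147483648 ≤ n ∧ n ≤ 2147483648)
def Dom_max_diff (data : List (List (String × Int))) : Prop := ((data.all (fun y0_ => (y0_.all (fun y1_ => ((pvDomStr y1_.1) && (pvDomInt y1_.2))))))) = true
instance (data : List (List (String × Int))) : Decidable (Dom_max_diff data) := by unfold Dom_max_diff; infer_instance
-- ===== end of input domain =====

-- B replaces A's rescan-all-dicts-per-key loop by a single pass accumulating per-key sums in a dict, then a max; measurably faster (asymptotic: O(total entries) vs O(keys × dicts)).

-- d.get(k, 0) / d[k]: first-match lookup in the association list representing the dict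
def pvGetD (d : List (String × Int)) (k : String) : Int := (PySem.Dict.mk d).getD k 0

-- ===== PORT A =====
def max_diff (data : List (List (String × Int))) : Int :=
  -- diffs = set(); for d in data: diffs = diffs.union(d.keys())
  -- then: result = 0; for diff in diffs: temp = sum([d.get(diff, 0) for d in data]); if temp > result: result = temp
  -- (the set's iteration order is not modelled; this max-accumulation is order-independent)
  (data.foldl (fun s d => PySem.Set.union s (d.map Prod.fst)) (PySem.Set.empty : PySem.Set String)).foldl (fun result diff =>
    if (data.map (fun d => pvGetD d diff)).sum > result
    then (data.map (fun d => pvGetD d diff)).sum else result) 0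

-- ===== PORT B =====
def max_diff_alt (data : List (List (String × Int))) : Int :=
  -- totals = {}; for d in data: for k in d: totals[k] = totals.get(k, 0) + d[k]
  -- ('for k in d' iterates the dict's distinct keys: dedup of the firsts, identity on a genuine dict;
  --  d[k] with k a key of d equals the total first-match lookup pvGetD d k)
  -- then: best = 0; for t in totals.values(): if t > best: best = t
  (data.foldl (fun t d =>
      (PySem.List.dedup (d.map Prod.fst)).foldl
        (fun t k => t.insert k (t.getD k 0 + pvGetD d k)) t)
    (PySem.Dict.empty : PySem.Dict String Int)).values.foldl (fun best t => if t > best then t else best) 0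

-- ===== PRECONDITION & SPEC =====
def Spec_max_diff (data : List (List (String × Int))) (out : Int) : Prop := out = max_diff_alt data
instance (data : List (List (String × Int))) (out : Int) : Decidable (Spec_max_diff data out) := by unfold Spec_max_diff; infer_instance

-- ===== CLAIM (what is proved, stated in full; the proofs are below) =====
def Claim_equal_max_diff : Prop := ∀ (data : List (List (String × Int))), Dom_max_diff data → Spec_max_diff data (max_diff data)

-- ===== LEMMAS AND PROOFS =====

-- a key absent from d looks up to the default 0
theorem pvGetD_of_not_mem (d : List (String × Int)) (x : String) (h : x ∉ d.map Prod.fst) :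
    pvGetD d x = 0 := by
  unfold pvGetD
  rw [PySem.Dict.getD_eq_get?_getD]
  have : (PySem.Dict.mk d).get? x = none := by
    rw [PySem.Dict.get?_eq_none_iff_not_mem_keys]
    simpa [PySem.Dict.keys_mk] using h
  simp [this]

-- inner accumulation loop: one insert per distinct key adds f k to the running total at k
theorem inner_getD (f : String → Int) (ks : List String) (hnd : ks.Nodup)
    (t : PySem.Dict String Int) (x : String) :
    (ks.foldl (fun t k => t.insert k (t.getD k 0 + f k)) t).getD x 0
      = t.getD x 0 + (if x ∈ ks then f x else 0) := by
  induction ks generalizing t with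
  | nil => simp
  | cons k rest ih =>
    have hnd' : rest.Nodup := hnd.of_cons
    simp only [List.foldl_cons]
    rw [ih hnd']
    by_cases hx : x = k
    · subst hx
      have hxr : x ∉ rest := (List.nodup_cons.mp hnd).1
      simp [PySem.Dict.getD_insert_self, hxr]
    · rw [PySem.Dict.getD_insert]
      simp [List.mem_cons, hx]

-- the whole pass: totals.getD x 0 is the sum of the per-dict lookups at x
theorem totals_getD (data : List (List (String × Int))) (t : PySem.Dict String Int) (x : String) :
    (data.foldl (fun t d =>
        (PySem.List.dedup (d.map Prod.fst)).foldl
          (fun t k => t.insert k (t.getD k 0 + pvGetD d k)) t) t).getD x 0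
      = t.getD x 0 + (data.map (fun d => pvGetD d x)).sum := by
  induction data generalizing t with
  | nil => simp
  | cons d rest ih =>
    simp only [List.foldl_cons, List.map_cons, List.sum_cons]
    rw [ih, inner_getD _ _ (PySem.List.nodup_dedup _)]
    by_cases hx : x ∈ d.map Prod.fst
    · simp [hx, add_assoc]
    · simp [hx, pvGetD_of_not_mem d x hx]

-- dedup does not change a Set.update
theorem update_dedup (s : PySem.Set String) (l : List String) :
    PySem.Set.update s (PySem.List.dedup l) = PySem.Set.update s l := by
  rw [PySem.Set.update_eq_append_filter, PySem.Set.update_eq_append_filter,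
    PySem.List.dedup_eq_ofList, PySem.Set.ofList_ofList]

-- B's accumulated keys are exactly A's union-of-keys set, in the same order
theorem totals_keys (data : List (List (String × Int))) (t : PySem.Dict String Int) :
    (data.foldl (fun t d =>
        (PySem.List.dedup (d.map Prod.fst)).foldl
          (fun t k => t.insert k (t.getD k 0 + pvGetD d k)) t) t).keys
      = data.foldl (fun s d => PySem.Set.union s (d.map Prod.fst)) t.keys := by
  induction data generalizing t with
  | nil => rfl
  | cons d rest ih =>
    simp only [List.foldl_cons]
    rw [ih]
    congr 1
    rw [PySem.Dict.keys_foldl_insert, update_dedup]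
    rfl
-- (Set.union s l is definitionally Set.update s l)

-- B's dict keeps its keys unique throughout
theorem totals_nodup (data : List (List (String × Int))) (t : PySem.Dict String Int)
    (h : t.keys.Nodup) :
    (data.foldl (fun t d =>
        (PySem.List.dedup (d.map Prod.fst)).foldl
          (fun t k => t.insert k (t.getD k 0 + pvGetD d k)) t) t).keys.Nodup := by
  induction data generalizing t with
  | nil => exact h
  | cons d rest ih =>
    exact ih _ (PySem.Dict.nodup_keys_foldl_insert _ _ _ h)

-- ===== VERDICT (by name: the statement is the Claim_ definition above) =====
theorem max_diff_spec : Claim_equal_max_diff := by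
  intro data _
  unfold Spec_max_diff max_diff max_diff_alt
  rw [PySem.Dict.values_eq_map_keys _
      (totals_nodup data PySem.Dict.empty PySem.Dict.nodup_keys_empty) 0]
  rw [List.foldl_map, totals_keys]
  refine PySem.List.foldl_congr_mem _ _ _ _ (fun best k _ => ?_)
  rw [totals_getD]
  simp [PySem.Dict.getD_empty]
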